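-- pv_equiv track=rewrite | github.com/ursakumeljfaks/Prakticna-matematika | 1.letnik/programiranje1/izpiti/izpitiPeF.py | hrana
-- ===== SOURCE A (Python) =====
-- def hrana(posodice):
--     navodilo = []
--     for i in range(1, posodice+1):
--         if i % 2 == 0 and i % 3 == 0:
--             navodilo.append("mokra in suha")
--         elif i % 2 == 0:
--             navodilo.append("suha")
--         elif i % 3 == 0:
--             navodilo.append("mokra")
--         else:
--             navodilo.append("voda")
--     return navodilo
-- ===== SOURCE B (Python) =====
-- def hrana(posodice):
--     period = ["voda", "suha", "mokra", "suha", "voda", "mokra in suha"]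
--     return (period * ((posodice + 5) // 6))[:posodice]
-- ===== Notes on version B (the rewrite author's own statement) =====
-- stated objective: simpler
-- what changed: Replaces the per-element divisibility branching (i%2/i%3 tests inside a loop) with tiling: the output is periodic, so B repeats a precomputed six-label block by list multiplication and truncates to length posodice.
import Mathlib
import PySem

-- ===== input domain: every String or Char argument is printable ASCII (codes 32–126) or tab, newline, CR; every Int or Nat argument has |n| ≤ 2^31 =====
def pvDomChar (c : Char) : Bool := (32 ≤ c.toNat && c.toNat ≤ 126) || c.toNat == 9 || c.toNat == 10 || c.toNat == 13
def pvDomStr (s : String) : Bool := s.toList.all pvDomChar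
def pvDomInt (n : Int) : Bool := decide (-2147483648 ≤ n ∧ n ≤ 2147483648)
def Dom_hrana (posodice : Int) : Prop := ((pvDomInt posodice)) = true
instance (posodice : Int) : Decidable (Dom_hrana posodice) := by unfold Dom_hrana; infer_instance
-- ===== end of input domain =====

-- B replaces A's per-element divisibility branching by tiling a precomputed period-6 block and truncating (simpler).

-- ===== PORT A =====
def hrana (posodice : Int) : List String :=
  (PySem.List.pyRange 1 (posodice + 1) 1).foldl
    (fun navodilo i =>
      if PySem.Int.mod i 2 = 0 ∧ PySem.Int.mod i 3 = 0 then navodilo ++ ["mokra in suha"]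
      else if PySem.Int.mod i 2 = 0 then navodilo ++ ["suha"]
      else if PySem.Int.mod i 3 = 0 then navodilo ++ ["mokra"]
      else navodilo ++ ["voda"]) []

-- ===== PORT B =====
def pvPeriod : List String := ["voda", "suha", "mokra", "suha", "voda", "mokra in suha"]

def hrana_alt (posodice : Int) : List String :=
  PySem.List.slice
    (List.flatten (List.replicate (PySem.Int.floordiv (posodice + 5) 6).toNat pvPeriod))
    none (some posodice)

-- ===== PRECONDITION & SPEC =====
def Spec_hrana (posodice : Int) (out : List String) : Prop := out = hrana_alt posodice
instance (posodice : Int) (out : List String) : Decidable (Spec_hrana posodice out) := by unfold Spec_hrana; infer_instance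

-- ===== CLAIM (what is proved, stated in full; the proofs are below) =====
def Claim_equal_hrana : Prop := ∀ (posodice : Int), Dom_hrana posodice → Spec_hrana posodice (hrana posodice)

-- ===== LEMMAS AND PROOFS =====

/-- the label at 0-based position j, read from the period block -/
def pvLbl (j : Nat) : String := pvPeriod.getD (j % 6) ""

theorem pv_tiling (k : Nat) :
    List.flatten (List.replicate k pvPeriod) = (List.range (6 * k)).map pvLbl := by
  induction k with
  | zero => rfl
  | succ k ih =>
    have h : 6 * (k + 1) = 6 + 6 * k := by ring
    rw [List.replicate_succ, List.flatten_cons, ih, h, List.range_add, List.map_append,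
      List.map_map]
    have h1 : pvPeriod = (List.range 6).map pvLbl := by decide
    have h2 : (List.range (6 * k)).map (pvLbl ∘ fun x => 6 + x)
        = (List.range (6 * k)).map pvLbl :=
      List.map_congr_left (fun j _ => by
        show pvPeriod.getD ((6 + j) % 6) "" = pvPeriod.getD (j % 6) ""
        congr 1
        omega)
    rw [h2, ← h1]

theorem pv_label_eq (j : Nat) :
    (if PySem.Int.mod (1 + (j : Int)) 2 = 0 ∧ PySem.Int.mod (1 + (j : Int)) 3 = 0 then "mokra in suha"
     else if PySem.Int.mod (1 + (j : Int)) 2 = 0 then "suha"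
     else if PySem.Int.mod (1 + (j : Int)) 3 = 0 then "mokra"
     else "voda") = pvLbl j := by
  rw [PySem.Int.mod_eq_emod_of_pos (by norm_num), PySem.Int.mod_eq_emod_of_pos (by norm_num)]
  have h : j % 6 = 0 ∨ j % 6 = 1 ∨ j % 6 = 2 ∨ j % 6 = 3 ∨ j % 6 = 4 ∨ j % 6 = 5 := by omega
  rcases h with h | h | h | h | h | h <;>
    · simp only [pvLbl, h]
      split_ifs <;> first | rfl | omega

theorem pv_hrana_eq_map (n : Int) : hrana n = (List.range n.toNat).map pvLbl := by
  unfold hrana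
  rw [PySem.List.pyRange_one 1 (n + 1), List.foldl_map]
  refine Eq.trans
    (PySem.List.foldl_congr_mem _ _ (fun (acc : List String) (k : Nat) => acc ++ [pvLbl k]) _ ?_) ?_
  · intro acc k _
    show _ = acc ++ [pvLbl k]
    rw [← pv_label_eq k]
    split_ifs <;> rfl
  · rw [PySem.List.foldl_append_singleton_eq_map]
    simp only [add_sub_cancel_right, List.nil_append]

theorem pv_alt_eq_map (n : Int) : hrana_alt n = (List.range n.toNat).map pvLbl := by
  unfold hrana_alt
  by_cases hn : 0 ≤ n
  · rw [PySem.List.slice_to _ hn, pv_tiling]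
    have hfd : PySem.Int.floordiv (n + 5) 6 = (n + 5) / 6 :=
      PySem.Int.floordiv_eq_ediv_of_pos (by norm_num)
    have hle : n.toNat ≤ 6 * ((n + 5) / 6).toNat := by omega
    rw [hfd, ← List.map_take, List.take_range, Nat.min_eq_left hle]
  · have hm : (PySem.Int.floordiv (n + 5) 6).toNat = 0 := by
      rw [PySem.Int.floordiv_eq_ediv_of_pos (by norm_num)]
      omega
    have hn0 : n.toNat = 0 := by omega
    rw [hm, hn0]
    simp [PySem.List.slice]

-- ===== VERDICT (by name: the statement is the Claim_ definition above) =====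
theorem hrana_spec : Claim_equal_hrana := by
  intro n _
  unfold Spec_hrana
  rw [pv_hrana_eq_map, pv_alt_eq_map]
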